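-- pv_equiv track=rewrite | github.com/ssunnykku/codingtest-study | sun_hee/23.1.2-6/문제3_가장 가까운 글자.py | solution
-- ===== SOURCE A (Python) =====
-- def solution(s):
--     answer = []
--     temp = []
--     for i in s:
--         if i not in temp:
--             temp.append(i)
--             answer.append(-1)
--         elif i in temp:
--             temp.append(i)
--             rest_list = list(filter(lambda x: temp[x] == i, range(len(temp))))
--             answer.append(rest_list[-1] - rest_list[-2])
--
--     return answer
-- ===== SOURCE B (Python) =====
-- def solution(s):
--     # One pass: remember each character's most recent index in a dict;
--     # the distance is current index minus that, or -1 on first sight.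
--     last = {}
--     answer = []
--     for idx, ch in enumerate(s):
--         answer.append(idx - last[ch] if ch in last else -1)
--         last[ch] = idx
--     return answer
-- ===== Notes on version B (the rewrite author's own statement) =====
-- stated objective: faster
-- what changed: Replaces the per-character history list with its repeated filter scan over range(len(temp)) by a single enumerate pass that keeps only each character's last index in a dict, so no inner scan remains.
import Mathlib
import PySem

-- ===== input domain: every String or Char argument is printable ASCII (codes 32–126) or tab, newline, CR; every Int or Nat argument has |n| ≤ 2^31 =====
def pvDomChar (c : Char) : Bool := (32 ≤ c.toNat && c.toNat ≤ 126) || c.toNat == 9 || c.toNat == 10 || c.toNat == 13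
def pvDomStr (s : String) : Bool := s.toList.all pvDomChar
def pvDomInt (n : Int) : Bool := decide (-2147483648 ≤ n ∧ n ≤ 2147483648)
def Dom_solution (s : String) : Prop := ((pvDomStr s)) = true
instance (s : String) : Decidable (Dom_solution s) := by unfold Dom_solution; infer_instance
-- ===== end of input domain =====

-- B replaces A's quadratic history-list filter scan by one pass keeping each char's last index in a dict.

-- ===== PORT A =====
def solution (s : String) : List Int :=
  (s.toList.foldl (fun st i =>
      let answer := st.1
      let temp := st.2
      if i ∉ temp then
        (answer ++ [(-1 : Int)], temp ++ [i])
      else if i ∈ temp then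
        let temp' := temp ++ [i]
        let rest_list := (PySem.List.pyRange 0 (temp'.length : Int) 1).filter
          (fun x => PySem.List.pyGet? temp' x == some i)
        -- rest_list always has ≥ 2 elements in this branch, so the `.getD 0` defaults
        -- (Python would raise IndexError) are unreachable
        (answer ++ [(PySem.List.pyGet? rest_list (-1)).getD 0
                      - (PySem.List.pyGet? rest_list (-2)).getD 0], temp')
      else (answer, temp)) ([], [])).1

-- ===== PORT B =====
def solution_alt (s : String) : List Int :=
  ((PySem.List.enumerate s.toList 0).foldl (fun st p =>
      let answer := st.1
      let last := st.2
      -- `last[ch]` is only read under the `ch in last` guard, so the `.getD … 0`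
      -- default is unreachable
      ((answer ++ [if last.contains p.2 then p.1 - last.getD p.2 0 else -1]),
        last.insert p.2 p.1)) ([], PySem.Dict.empty)).1

-- ===== PRECONDITION & SPEC =====
def Spec_solution (s : String) (out : List Int) : Prop := out = solution_alt s
instance (s : String) (out : List Int) : Decidable (Spec_solution s out) := by unfold Spec_solution; infer_instance

-- ===== CLAIM (what is proved, stated in full; the proofs are below) =====
def Claim_equal_solution : Prop := ∀ (s : String), Dom_solution s → Spec_solution s (solution s)

-- ===== LEMMAS AND PROOFS =====

/-- The indices of `c` in `pre`, exactly as A's `rest_list` computes them. -/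
def pvIdxs (pre : List Char) (c : Char) : List Int :=
  (PySem.List.pyRange 0 (pre.length : Int) 1).filter
    (fun x => PySem.List.pyGet? pre x == some c)

theorem pvGet_neg_one (xs : List Int) (a : Int) :
    PySem.List.pyGet? (xs ++ [a]) (-1) = some a := by
  simp [PySem.List.pyGet?, PySem.List.pyIdx?]

theorem pvGet_neg_two (xs : List Int) (a : Int) (h : xs ≠ []) :
    PySem.List.pyGet? (xs ++ [a]) (-2) = xs.getLast? := by
  have hx : 1 ≤ xs.length := List.length_pos_iff.mpr h
  simp only [PySem.List.pyGet?, PySem.List.pyIdx?, List.length_append, List.length_singleton]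
  norm_num
  rw [if_pos hx]
  have : xs.length + 1 - Int.toNat 2 = xs.length - 1 := by omega
  rw [this]; simp only [Option.bind_some]; rw [List.getElem?_append_left (by omega), List.getLast?_eq_getElem?]

theorem pvIdxs_append (pre : List Char) (a c : Char) :
    pvIdxs (pre ++ [a]) c =
      if a = c then pvIdxs pre c ++ [(pre.length : Int)] else pvIdxs pre c := by
  unfold pvIdxs
  have hlen : ((pre ++ [a]).length : Int) = (pre.length : Int) + 1 := by
    simp
  rw [hlen, PySem.List.pyRange_one_succ_right (by positivity), List.filter_append]
  have h1 : ∀ x ∈ PySem.List.pyRange 0 (pre.length : Int) 1,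
      (PySem.List.pyGet? (pre ++ [a]) x == some c) = (PySem.List.pyGet? pre x == some c) := by
    intro x hx
    rw [PySem.List.mem_pyRange_one] at hx
    obtain ⟨k, hk, rfl⟩ : ∃ k : Nat, k < pre.length ∧ (k : Int) = x :=
      ⟨x.toNat, by omega, by omega⟩
    rw [PySem.List.pyGet?_natCast, PySem.List.pyGet?_natCast, List.getElem?_append_left hk]
  rw [List.filter_congr h1]
  by_cases hac : a = c
  · subst hac; simp
  · simp [hac]

theorem pvIdxs_ne_nil_iff (pre : List Char) (c : Char) :
    c ∈ pre ↔ pvIdxs pre c ≠ [] := by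
  induction pre using List.reverseRecOn with
  | nil => simp [pvIdxs, PySem.List.pyRange]
  | append_singleton xs a ih =>
      rw [pvIdxs_append]
      by_cases hac : a = c
      · subst hac; simp
      · simp [hac, ih, Ne.symm hac]

theorem pv_inv_step (pre : List Char) (h : Char) (d : PySem.Dict Char Int)
    (hd : ∀ c, d.get? c = (pvIdxs pre c).getLast?) :
    ∀ c, (d.insert h (pre.length : Int)).get? c = (pvIdxs (pre ++ [h]) c).getLast? := by
  intro c
  rw [pvIdxs_append]
  by_cases hc : c = h
  · subst hc; rw [PySem.Dict.get?_insert_self, if_pos rfl]; simp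
  · rw [PySem.Dict.get?_insert_of_ne _ _ hc, hd, if_neg (Ne.symm hc)]

theorem pv_main (l : List Char) : ∀ (pre : List Char) (acc : List Int) (d : PySem.Dict Char Int),
    (∀ c : Char, d.get? c = (pvIdxs pre c).getLast?) →
    (l.foldl (fun st i =>
      let answer := st.1
      let temp := st.2
      if i ∉ temp then
        (answer ++ [(-1 : Int)], temp ++ [i])
      else if i ∈ temp then
        let temp' := temp ++ [i]
        let rest_list := (PySem.List.pyRange 0 (temp'.length : Int) 1).filter
          (fun x => PySem.List.pyGet? temp' x == some i)
        (answer ++ [(PySem.List.pyGet? rest_list (-1)).getD 0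
                      - (PySem.List.pyGet? rest_list (-2)).getD 0], temp')
      else (answer, temp)) (acc, pre)).1 =
    ((PySem.List.enumerate l (pre.length : Int)).foldl (fun st p =>
      let answer := st.1
      let last := st.2
      ((answer ++ [if last.contains p.2 then p.1 - last.getD p.2 0 else -1]),
        last.insert p.2 p.1)) (acc, d)).1 := by
  induction l with
  | nil => intro pre acc d hd; rfl
  | cons h t ih =>
    intro pre acc d hd
    have henum : PySem.List.enumerate (h :: t) (pre.length : Int)
        = ((pre.length : Int), h) :: PySem.List.enumerate t ((pre.length : Int) + 1) := rfl
    rw [henum]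
    simp only [List.foldl_cons]
    have hcont : d.contains h = decide (h ∈ pre) := by
      rw [PySem.Dict.contains_eq_isSome_get?, hd]
      by_cases hm : h ∈ pre
      · simp [hm, List.getLast?_isSome, (pvIdxs_ne_nil_iff pre h).mp hm]
      · have : pvIdxs pre h = [] := by
          by_contra hne; exact hm ((pvIdxs_ne_nil_iff pre h).mpr hne)
        simp [hm, this]
    have hlen1 : ((pre ++ [h]).length : Int) = (pre.length : Int) + 1 := by
      simp
    by_cases hmem : h ∈ pre
    · -- repeated character
      have hne : pvIdxs pre h ≠ [] := (pvIdxs_ne_nil_iff pre h).mp hmem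
      obtain ⟨j, hj⟩ : ∃ j, (pvIdxs pre h).getLast? = some j :=
        Option.isSome_iff_exists.mp (List.getLast?_isSome.mpr hne)
      have hrest : (PySem.List.pyRange 0 (((pre ++ [h]).length : Int)) 1).filter
          (fun x => PySem.List.pyGet? (pre ++ [h]) x == some h)
          = pvIdxs pre h ++ [(pre.length : Int)] := by
        rw [show (PySem.List.pyRange 0 (((pre ++ [h]).length : Int)) 1).filter
          (fun x => PySem.List.pyGet? (pre ++ [h]) x == some h) = pvIdxs (pre ++ [h]) h from rfl,
          pvIdxs_append, if_pos rfl]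
      simp only [hmem, not_true_eq_false, if_false, hrest, hcont,
        pvGet_neg_one, pvGet_neg_two _ _ hne, hj, decide_true, if_pos,
        PySem.Dict.getD_eq_get?_getD, hd, Option.getD_some]
      rw [← hlen1]
      exact ih (pre ++ [h]) _ _ (pv_inv_step pre h d hd)
    · -- first occurrence
      simp only [hmem, not_false_eq_true, if_true, hcont, decide_false, Bool.false_eq_true,
        if_false]
      rw [← hlen1]
      exact ih (pre ++ [h]) _ _ (pv_inv_step pre h d hd)

-- ===== VERDICT (by name: the statement is the Claim_ definition above) =====
theorem solution_spec : Claim_equal_solution := by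
  intro s _
  unfold Spec_solution solution solution_alt
  exact pv_main s.toList [] [] PySem.Dict.empty (fun c => by
    simp [pvIdxs, PySem.Dict.get?_empty, PySem.List.pyRange])
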